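-- pv_equiv track=rewrite | github.com/OpenKodaAI/koda | koda/services/queue_manager.py | _has_post_write_verification
-- ===== SOURCE A (Python) =====
-- from typing import Any, Protocol, cast
--
-- def _has_post_write_verification(tool_steps: list[dict[str, Any]]) -> bool:
--     """Whether a successful read-only check happened after the last write."""
--     last_write_index: int | None = None
--     for index, step in enumerate(tool_steps):
--         if step.get("metadata", {}).get("write"):
--             last_write_index = index
--     if last_write_index is None:
--         return False
--     for step in tool_steps[last_write_index + 1 :]:
--         if step.get("success") and not step.get("metadata", {}).get("write"):
--             return True
--     return False
-- ===== SOURCE B (Python) =====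
-- def _has_post_write_verification(tool_steps):
--     """Whether a successful read-only check happened after the last write."""
--     seen_success = False
--     for step in reversed(tool_steps):
--         if step.get("metadata", {}).get("write"):
--             return seen_success
--         if step.get("success"):
--             seen_success = True
--     return False
-- ===== Notes on version B (the rewrite author's own statement) =====
-- stated objective: simpler
-- what changed: Replaced A's two forward passes (enumerate to find the last write index, then scan the tail slice) by a single backward scan that carries one boolean 'seen_success' and answers at the first write it meets.
import Mathlib
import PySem

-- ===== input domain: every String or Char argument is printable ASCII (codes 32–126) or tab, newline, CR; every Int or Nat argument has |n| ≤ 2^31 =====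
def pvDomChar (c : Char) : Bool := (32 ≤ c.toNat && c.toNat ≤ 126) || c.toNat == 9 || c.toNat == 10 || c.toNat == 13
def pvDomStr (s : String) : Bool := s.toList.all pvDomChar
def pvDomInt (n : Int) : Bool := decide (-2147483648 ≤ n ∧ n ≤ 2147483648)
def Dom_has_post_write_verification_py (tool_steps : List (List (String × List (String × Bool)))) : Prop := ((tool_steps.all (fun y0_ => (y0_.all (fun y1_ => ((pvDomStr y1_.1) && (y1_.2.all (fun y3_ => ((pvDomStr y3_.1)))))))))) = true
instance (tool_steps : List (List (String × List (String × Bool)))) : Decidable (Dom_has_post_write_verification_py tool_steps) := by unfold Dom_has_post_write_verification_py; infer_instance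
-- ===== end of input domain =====

-- ===== PORT A =====
-- Header: B replaces A's two forward passes with one backward scan carrying a single boolean (objective: simpler).
-- Shared Python-expression helpers (identical access expressions in both programs):
-- step.get("metadata", {}).get("write") truthiness
def pvWrite (step : List (String × List (String × Bool))) : Bool :=
  PySem.Dict.getD (PySem.Dict.mk (PySem.Dict.getD (PySem.Dict.mk step) "metadata" [])) "write" false
-- step.get("success") truthiness (missing key or empty dict value is falsy)
def pvSuccess (step : List (String × List (String × Bool))) : Bool :=
  !(PySem.Dict.getD (PySem.Dict.mk step) "success" []).isEmpty

def has_post_write_verification_py (tool_steps : List (List (String × List (String × Bool)))) : Bool :=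
  -- first loop: for index, step in enumerate(tool_steps): if write: last_write_index = index
  let last_write_index : Option Int :=
    (PySem.List.enumerate tool_steps).foldl
      (fun acc p => if pvWrite p.2 then some p.1 else acc) none
  match last_write_index with
  | none => false
  | some i =>
    -- second loop over tool_steps[last_write_index + 1 :], early return True
    (PySem.List.slice tool_steps (some (i + 1)) none).any
      (fun step => pvSuccess step && !pvWrite step)

-- ===== PORT B =====
-- B: single backward scan; at the first write encountered return the accumulated flag.
def pvGoB : List (List (String × List (String × Bool))) → Bool → Bool
  | [], _ => false
  | step :: rest, seen =>
    if pvWrite step then seen else pvGoB rest (seen || pvSuccess step)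

def has_post_write_verification_py_alt (tool_steps : List (List (String × List (String × Bool)))) : Bool :=
  pvGoB tool_steps.reverse false

-- ===== PRECONDITION & SPEC =====
def Spec_has_post_write_verification_py (tool_steps : List (List (String × List (String × Bool)))) (out : Bool) : Prop := out = has_post_write_verification_py_alt tool_steps
instance (tool_steps : List (List (String × List (String × Bool)))) (out : Bool) : Decidable (Spec_has_post_write_verification_py tool_steps out) := by unfold Spec_has_post_write_verification_py; infer_instance

-- ===== CLAIM (what is proved, stated in full; the proofs are below) =====
def Claim_equal_has_post_write_verification_py : Prop := ∀ (tool_steps : List (List (String × List (String × Bool)))), Dom_has_post_write_verification_py tool_steps → Spec_has_post_write_verification_py tool_steps (has_post_write_verification_py tool_steps)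

-- ===== LEMMAS AND PROOFS =====



-- abbreviation for A's first loop (proof-side only)
def pvLW (ts : List (List (String × List (String × Bool)))) : Option Int :=
  (PySem.List.enumerate ts).foldl (fun acc p => if pvWrite p.2 then some p.1 else acc) none

theorem pvA_eq (ts : List (List (String × List (String × Bool)))) :
    has_post_write_verification_py ts
      = (match pvLW ts with
         | none => false
         | some i => (PySem.List.slice ts (some (i + 1)) none).any
             (fun step => pvSuccess step && !pvWrite step)) := rfl

theorem pvA_none (ts : List (List (String × List (String × Bool))))
    (h : pvLW ts = none) : has_post_write_verification_py ts = false := by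
  rw [pvA_eq, h]

theorem pvA_some (ts : List (List (String × List (String × Bool)))) (i : Int)
    (h : pvLW ts = some i) :
    has_post_write_verification_py ts
      = (PySem.List.slice ts (some (i + 1)) none).any
          (fun step => pvSuccess step && !pvWrite step) := by
  rw [pvA_eq, h]

theorem pvEnum_append (xs : List (List (String × List (String × Bool))))
    (x : List (String × List (String × Bool))) (s0 : Int) :
    PySem.List.enumerate (xs ++ [x]) s0
      = PySem.List.enumerate xs s0 ++ [(s0 + xs.length, x)] := by
  induction xs generalizing s0 with
  | nil => simp [PySem.List.enumerate_nil, PySem.List.enumerate_cons]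
  | cons a xs ih =>
    simp only [List.cons_append, PySem.List.enumerate_cons, ih, List.length_cons]
    have : s0 + 1 + (xs.length : Int) = s0 + ((xs.length : Int) + 1) := by omega
    simp [this]

theorem pvLW_append (xs : List (List (String × List (String × Bool))))
    (x : List (String × List (String × Bool))) :
    pvLW (xs ++ [x]) = if pvWrite x then some (xs.length : Int) else pvLW xs := by
  unfold pvLW
  rw [pvEnum_append]
  simp [List.foldl_append]

theorem pvLW_none (xs : List (List (String × List (String × Bool)))) :
    pvLW xs = none ↔ xs.any pvWrite = false := by
  induction xs using List.reverseRecOn with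
  | nil => simp [pvLW, PySem.List.enumerate_nil]
  | append_singleton xs x ih =>
    rw [pvLW_append]
    by_cases h : pvWrite x = true <;> simp [h, ih]

theorem pvLW_some (xs : List (List (String × List (String × Bool)))) (i : Int)
    (h : pvLW xs = some i) : 0 ≤ i ∧ i < xs.length := by
  induction xs using List.reverseRecOn generalizing i with
  | nil => simp [pvLW, PySem.List.enumerate_nil] at h
  | append_singleton xs x ih =>
    rw [pvLW_append] at h
    by_cases hw : pvWrite x = true
    · rw [if_pos hw] at h
      cases h
      constructor
      · omega
      · simp only [List.length_append, List.length_cons, List.length_nil]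
        omega
    · rw [if_neg (by simp [hw])] at h
      have := ih i h
      constructor
      · omega
      · simp only [List.length_append, List.length_cons, List.length_nil]
        omega

theorem pvGoB_no_write (l : List (List (String × List (String × Bool)))) (seen : Bool)
    (h : ∀ s ∈ l, pvWrite s = false) : pvGoB l seen = false := by
  induction l generalizing seen with
  | nil => rfl
  | cons a l ih =>
    have ha := h a (by simp)
    simp [pvGoB, ha]
    exact ih _ (fun s hs => h s (by simp [hs]))

theorem pvGoB_seen (l : List (List (String × List (String × Bool)))) (seen : Bool) :
    pvGoB l seen = (l.any pvWrite && (seen || pvGoB l false)) := by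
  induction l generalizing seen with
  | nil => rfl
  | cons a l ih =>
    by_cases hw : pvWrite a = true
    · simp [pvGoB, hw]
    · simp only [pvGoB, hw, if_neg, Bool.false_eq_true, not_false_iff, List.any_cons,
        Bool.false_or]
      rw [ih (seen || pvSuccess a), ih (pvSuccess a)]
      cases l.any pvWrite <;> cases seen <;> cases pvSuccess a <;>
        cases pvGoB l false <;> rfl

theorem pvMain (ts : List (List (String × List (String × Bool)))) :
    has_post_write_verification_py ts = has_post_write_verification_py_alt ts := by
  induction ts using List.reverseRecOn with
  | nil => rfl
  | append_singleton xs x ih =>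
    have hB : has_post_write_verification_py_alt (xs ++ [x])
        = pvGoB (x :: xs.reverse) false := by
      simp [has_post_write_verification_py_alt]
    by_cases hw : pvWrite x = true
    · -- x is the last write: A scans an empty tail; B returns the initial flag, false
      have hlw : pvLW (xs ++ [x]) = some (xs.length : Int) := by
        rw [pvLW_append, if_pos hw]
      rw [pvA_some _ _ hlw, hB]
      rw [PySem.List.slice_from _ (by omega)]
      have hdrop : (xs ++ [x]).drop ((xs.length : Int) + 1).toNat = [] := by
        have h1 : ((xs.length : Int) + 1).toNat = xs.length + 1 := by omega
        rw [h1]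
        simp
      rw [hdrop]
      simp [pvGoB, hw]
    · have hwx : pvWrite x = false := by simp at hw; exact hw
      have hlw : pvLW (xs ++ [x]) = pvLW xs := by
        rw [pvLW_append, if_neg (by simp [hwx])]
      have hBstep : pvGoB (x :: xs.reverse) false
          = pvGoB xs.reverse (pvSuccess x) := by simp [pvGoB, hwx]
      cases hlw2 : pvLW xs with
      | none =>
        -- no write anywhere: both sides false
        have hnone := (pvLW_none xs).mp hlw2
        rw [pvA_none _ (hlw.trans hlw2), hB, hBstep, pvGoB_no_write]
        intro s hs
        have hmem : s ∈ xs := List.mem_reverse.mp hs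
        simpa using (List.any_eq_false.mp hnone) s hmem
      | some i =>
        obtain ⟨h0, hlt⟩ := pvLW_some xs i hlw2
        have hwr : xs.any pvWrite = true := by
          by_contra hc
          have h2 := (pvLW_none xs).mpr (by simpa using hc)
          rw [hlw2] at h2
          simp at h2
        have hle : (i + 1).toNat ≤ xs.length := by omega
        rw [pvA_some _ _ (hlw.trans hlw2), hB]
        rw [PySem.List.slice_from _ (by omega)]
        have hsplit : (xs ++ [x]).drop (i + 1).toNat
            = xs.drop (i + 1).toNat ++ [x] := List.drop_append_of_le_length hle
        rw [hsplit, List.any_append]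
        have hAxs := pvA_some xs i hlw2
        rw [PySem.List.slice_from _ (by omega)] at hAxs
        have hrev : xs.reverse.any pvWrite = true := by simpa using hwr
        rw [hBstep, pvGoB_seen, hrev]
        have hBxs : pvGoB xs.reverse false = has_post_write_verification_py_alt xs := by
          simp [has_post_write_verification_py_alt]
        rw [hBxs, ← ih, hAxs]
        simp only [List.any_cons, List.any_nil, hwx, Bool.not_false, Bool.and_true,
          Bool.or_false, Bool.true_and]
        cases (xs.drop (i + 1).toNat).any (fun step => pvSuccess step && !pvWrite step) <;>
          cases pvSuccess x <;> rfl

-- ===== VERDICT =====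
theorem has_post_write_verification_py_spec : Claim_equal_has_post_write_verification_py := by
  intro ts _
  exact pvMain ts
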